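-- pv_equiv track=rewrite | github.com/AlexSzatmary/advent-of-code-2024 | day-08/run_08.py | find_antinodes_2
-- ===== SOURCE A (Python) =====
-- def find_antinodes_2(
--     frequencies_antennas: dict[str, list[tuple[int, int]]], imax: int, jmax: int
-- ) -> set[tuple[int, int]]:
--     antinodes = set()
--     for antennas in frequencies_antennas.values():
--         antinodes.update(antennas)  # add all antennas, which are now all antinodes
--         for p in range(0, len(antennas) - 1):
--             for q in range(p + 1, len(antennas)):
--                 p_i, p_j = antennas[p]
--                 q_i, q_j = antennas[q]
--
--                 k = 1
--                 while True:
--                     a_i, a_j = p_i + k * (p_i - q_i), p_j + k * (p_j - q_j)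
--                     if 0 <= a_i < imax and 0 <= a_j < jmax:
--                         antinodes.add((a_i, a_j))
--                     else:
--                         break
--                     k += 1
--
--                 k = 1
--                 while True:
--                     a_i, a_j = p_i - k * (p_i - q_i), p_j - k * (p_j - q_j)
--                     if 0 <= a_i < imax and 0 <= a_j < jmax:
--                         antinodes.add((a_i, a_j))
--                     else:
--                         break
--                     k += 1
--     return antinodes
-- ===== SOURCE B (Python) =====
-- def find_antinodes_2(frequencies_antennas, imax, jmax):
--     antinodes = set()
--
--     def axis_run(p, d, m):
--         # largest k >= 0 such that 0 <= p + k'*d < m for every 1 <= k' <= k;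
--         # None means every k >= 1 works (d == 0 and p already in bounds)
--         if d == 0:
--             return None if 0 <= p < m else 0
--         if d > 0:
--             lo, hi = -(p // d), (m - 1 - p) // d
--         else:
--             e = -d
--             lo, hi = -((m - 1 - p) // e), p // e
--         return hi if lo <= 1 <= hi else 0
--
--     for antennas in frequencies_antennas.values():
--         antinodes.update(antennas)  # every antenna is itself an antinode
--         n = len(antennas)
--         for p in range(0, n - 1):
--             for q in range(p + 1, n):
--                 p_i, p_j = antennas[p]
--                 q_i, q_j = antennas[q]
--                 d_i, d_j = p_i - q_i, p_j - q_j
--                 if d_i == 0 and d_j == 0: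
--                     continue  # coincident pair: its line adds no new point
--                 for s_i, s_j in ((d_i, d_j), (-d_i, -d_j)):
--                     ri = axis_run(p_i, s_i, imax)
--                     rj = axis_run(p_j, s_j, jmax)
--                     steps = rj if ri is None else (ri if rj is None else min(ri, rj))
--                     for k in range(1, steps + 1):
--                         antinodes.add((p_i + k * s_i, p_j + k * s_j))
--     return antinodes
-- ===== Notes on version B (the rewrite author's own statement) =====
-- stated objective: alternative
-- what changed: The two unbounded while-loops that march outward step by step testing bounds each step are replaced by a closed-form step count per direction (computed with floor divisions per axis) followed by a bounded range loop, and coincident antenna pairs are skipped instead of looping on them.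
import Mathlib
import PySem

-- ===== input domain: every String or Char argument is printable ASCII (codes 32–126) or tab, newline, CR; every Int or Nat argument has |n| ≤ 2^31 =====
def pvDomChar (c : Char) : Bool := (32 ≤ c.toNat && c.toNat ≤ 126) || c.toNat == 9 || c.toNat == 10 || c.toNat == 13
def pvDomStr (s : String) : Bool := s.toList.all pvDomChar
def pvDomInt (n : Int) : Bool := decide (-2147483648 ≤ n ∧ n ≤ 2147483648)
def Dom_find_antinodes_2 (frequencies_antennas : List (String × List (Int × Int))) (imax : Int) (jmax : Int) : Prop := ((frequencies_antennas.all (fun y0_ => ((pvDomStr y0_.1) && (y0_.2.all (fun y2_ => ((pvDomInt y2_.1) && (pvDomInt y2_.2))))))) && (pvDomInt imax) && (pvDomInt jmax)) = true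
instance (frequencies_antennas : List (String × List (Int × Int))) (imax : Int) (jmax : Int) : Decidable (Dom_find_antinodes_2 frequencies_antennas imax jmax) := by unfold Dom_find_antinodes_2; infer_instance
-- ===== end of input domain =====

-- B replaces A's unbounded outward while-march per direction by a closed-form step count
-- (floor divisions per axis) followed by a bounded range loop, skipping coincident pairs.

-- ===== PORT A =====

-- 0 <= i < imax and 0 <= j < jmax
def pvInB (imax jmax i j : Int) : Bool :=
  decide (0 ≤ i) && decide (i < imax) && decide (0 ≤ j) && decide (j < jmax)

-- A's 'k = 1; while True: …' loop. The fuel argument only makes the recursion structural: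
-- inside Pre_ the loop breaks before the fuel (imax.toNat + jmax.toNat + 2) runs out.
def pvMarch (imax jmax p_i p_j d_i d_j : Int) : Int → Nat → PySem.Set (Int × Int) → PySem.Set (Int × Int)
  | _, 0, s => s
  | k, fuel + 1, s =>
    let a_i := p_i + k * d_i
    let a_j := p_j + k * d_j
    if pvInB imax jmax a_i a_j then
      pvMarch imax jmax p_i p_j d_i d_j (k + 1) fuel (PySem.Set.add s (a_i, a_j))
    else s

def find_antinodes_2 (frequencies_antennas : List (String × List (Int × Int))) (imax : Int) (jmax : Int) : List (Int × Int) :=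
  frequencies_antennas.foldl (fun antinodes kv =>
    let antennas := kv.2
    let antinodes := PySem.Set.update antinodes antennas
    (PySem.List.pyRange 0 ((antennas.length : Int) - 1) 1).foldl (fun antinodes p =>
      (PySem.List.pyRange (p + 1) (antennas.length : Int) 1).foldl (fun antinodes q =>
        let pa := PySem.List.pyGetD antennas p (0, 0)
        let qa := PySem.List.pyGetD antennas q (0, 0)
        let d_i := pa.1 - qa.1
        let d_j := pa.2 - qa.2
        let fuel := imax.toNat + jmax.toNat + 2
        let antinodes := pvMarch imax jmax pa.1 pa.2 d_i d_j 1 fuel antinodes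
        pvMarch imax jmax pa.1 pa.2 (-d_i) (-d_j) 1 fuel antinodes) antinodes) antinodes)
    PySem.Set.empty

-- ===== PORT B =====

-- Source B's axis_run: largest k ≥ 0 with 0 ≤ p + k'*d < m for every 1 ≤ k' ≤ k; none = unbounded
def pvAxisRun (p d m : Int) : Option Int :=
  if d = 0 then (if 0 ≤ p ∧ p < m then none else some 0)
  else if 0 < d then
    let lo := -(PySem.Int.floordiv p d)
    let hi := PySem.Int.floordiv (m - 1 - p) d
    some (if lo ≤ 1 ∧ 1 ≤ hi then hi else 0)
  else
    let e := -d
    let lo := -(PySem.Int.floordiv (m - 1 - p) e)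
    let hi := PySem.Int.floordiv p e
    some (if lo ≤ 1 ∧ 1 ≤ hi then hi else 0)

-- steps = rj if ri is None else (ri if rj is None else min(ri, rj)); the caller never
-- passes (s_i, s_j) = (0, 0), so ri and rj are never both none
def pvSteps (p_i p_j s_i s_j imax jmax : Int) : Int :=
  match pvAxisRun p_i s_i imax, pvAxisRun p_j s_j jmax with
  | none, none => 0
  | none, some r => r
  | some r, none => r
  | some a, some b => min a b

-- 'for k in range(1, steps + 1): antinodes.add(…)'
def pvMark (imax jmax p_i p_j s_i s_j : Int) (acc : PySem.Set (Int × Int)) : PySem.Set (Int × Int) :=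
  (PySem.List.pyRange 1 (pvSteps p_i p_j s_i s_j imax jmax + 1) 1).foldl
    (fun acc k => PySem.Set.add acc (p_i + k * s_i, p_j + k * s_j)) acc

def find_antinodes_2_alt (frequencies_antennas : List (String × List (Int × Int))) (imax : Int) (jmax : Int) : List (Int × Int) :=
  frequencies_antennas.foldl (fun antinodes kv =>
    let antennas := kv.2
    let antinodes := PySem.Set.update antinodes antennas
    (PySem.List.pyRange 0 ((antennas.length : Int) - 1) 1).foldl (fun antinodes p =>
      (PySem.List.pyRange (p + 1) (antennas.length : Int) 1).foldl (fun antinodes q =>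
        let pa := PySem.List.pyGetD antennas p (0, 0)
        let qa := PySem.List.pyGetD antennas q (0, 0)
        let d_i := pa.1 - qa.1
        let d_j := pa.2 - qa.2
        if d_i = 0 ∧ d_j = 0 then antinodes
        else
          let antinodes := pvMark imax jmax pa.1 pa.2 d_i d_j antinodes
          pvMark imax jmax pa.1 pa.2 (-d_i) (-d_j) antinodes) antinodes) antinodes)
    PySem.Set.empty

-- ===== PRECONDITION & SPEC =====

-- Pre_ excludes exactly the inputs on which A never returns: a frequency holding the same
-- antenna position twice while that position is inside the grid makes A's while-loop spin
-- forever (zero displacement, always in bounds).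
def Pre_find_antinodes_2 (frequencies_antennas : List (String × List (Int × Int))) (imax : Int) (jmax : Int) : Prop :=
  ∀ kv ∈ frequencies_antennas, ∀ a ∈ kv.2,
    (0 ≤ a.1 ∧ a.1 < imax ∧ 0 ≤ a.2 ∧ a.2 < jmax) → kv.2.count a ≤ 1

instance (frequencies_antennas : List (String × List (Int × Int))) (imax : Int) (jmax : Int) : Decidable (Pre_find_antinodes_2 frequencies_antennas imax jmax) := by
  unfold Pre_find_antinodes_2; infer_instance

def pvWitness_find_antinodes_2 : (List (String × List (Int × Int))) × Int × Int :=
  ([("a", [(0, 0), (2, 1)]), ("b", [(3, 3)])], 6, 6)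

def Spec_find_antinodes_2 (frequencies_antennas : List (String × List (Int × Int))) (imax : Int) (jmax : Int) (out : List (Int × Int)) : Prop := out = find_antinodes_2_alt frequencies_antennas imax jmax
instance (frequencies_antennas : List (String × List (Int × Int))) (imax : Int) (jmax : Int) (out : List (Int × Int)) : Decidable (Spec_find_antinodes_2 frequencies_antennas imax jmax out) := by unfold Spec_find_antinodes_2; infer_instance

-- ===== CLAIM (what is proved, stated in full; the proofs are below) =====
def Claim_equal_find_antinodes_2 : Prop := ∀ (frequencies_antennas : List (String × List (Int × Int))) (imax : Int) (jmax : Int), Dom_find_antinodes_2 frequencies_antennas imax jmax → Pre_find_antinodes_2 frequencies_antennas imax jmax → Spec_find_antinodes_2 frequencies_antennas imax jmax (find_antinodes_2 frequencies_antennas imax jmax)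

-- ===== LEMMAS AND PROOFS =====

-- axis_run's closed form is correct: some K bounds the consecutive run from k = 1
lemma pvAxisRun_none {p d m : Int} (h : pvAxisRun p d m = none) :
    d = 0 ∧ 0 ≤ p ∧ p < m := by
  unfold pvAxisRun at h
  split_ifs at h with h1 h2; simp_all

lemma pvAxisRun_some {p d m K : Int} (h : pvAxisRun p d m = some K) :
    0 ≤ K ∧ (∀ k : Int, 1 ≤ k → k ≤ K → 0 ≤ p + k * d ∧ p + k * d < m) ∧
      ¬(0 ≤ p + (K + 1) * d ∧ p + (K + 1) * d < m) := by
  unfold pvAxisRun at h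
  split_ifs at h with h0 hb hpos
  · -- d = 0, base point out of bounds: K = 0 and k = 1 already fails
    simp at h
    subst h0
    refine ⟨by omega, fun k hk1 hk2 => by omega, ?_⟩
    rintro ⟨hg, hl⟩
    exact hb ⟨by omega, by omega⟩
  · -- 0 < d
    have hlow : ∀ k : Int, (0 ≤ p + k * d) ↔ (-(PySem.Int.floordiv p d) ≤ k) := by
      intro k
      rw [neg_le, PySem.Int.le_floordiv_iff_mul_le hpos]
      constructor <;> intro hh <;> nlinarith
    have hhigh : ∀ k : Int, (p + k * d < m) ↔ (k ≤ PySem.Int.floordiv (m - 1 - p) d) := by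
      intro k
      rw [PySem.Int.le_floordiv_iff_mul_le hpos]
      constructor <;> intro hh <;> nlinarith
    simp only at h
    split_ifs at h with hc
    · injection h with h; subst h
      refine ⟨by omega, fun k hk1 hk2 => ⟨(hlow k).mpr (by omega), (hhigh k).mpr hk2⟩, ?_⟩
      rintro ⟨-, hlt⟩
      have := (hhigh _).mp hlt
      omega
    · injection h with h; subst h
      refine ⟨le_refl 0, fun k hk1 hk2 => by omega, ?_⟩
      rintro ⟨hge, hlt⟩
      exact hc ⟨by have := (hlow 1).mp (by simpa using hge); omega,
                by have := (hhigh 1).mp (by simpa using hlt); omega⟩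
  · -- d < 0
    have hd : 0 < -d := by omega
    have hlow : ∀ k : Int, (0 ≤ p + k * d) ↔ (k ≤ PySem.Int.floordiv p (-d)) := by
      intro k
      rw [PySem.Int.le_floordiv_iff_mul_le hd]
      constructor <;> intro hh <;> nlinarith
    have hhigh : ∀ k : Int, (p + k * d < m) ↔ (-(PySem.Int.floordiv (m - 1 - p) (-d)) ≤ k) := by
      intro k
      rw [neg_le, PySem.Int.le_floordiv_iff_mul_le hd]
      constructor <;> intro hh <;> nlinarith
    simp only at h
    split_ifs at h with hc
    · injection h with h; subst h
      refine ⟨by omega, fun k hk1 hk2 => ⟨(hlow k).mpr hk2, (hhigh k).mpr (by omega)⟩, ?_⟩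
      rintro ⟨hge, -⟩
      have := (hlow _).mp hge
      omega
    · injection h with h; subst h
      refine ⟨le_refl 0, fun k hk1 hk2 => by omega, ?_⟩
      rintro ⟨hge, hlt⟩
      exact hc ⟨by have := (hhigh 1).mp (by simpa using hlt); omega,
                by have := (hlow 1).mp (by simpa using hge); omega⟩

lemma pvAxisRun_some_le {p d m K : Int} (h : pvAxisRun p d m = some K) : K ≤ (m.toNat : Int) := by
  have hd0 : d = 0 → K = 0 := by
    intro hd; unfold pvAxisRun at h; simp [hd] at h; omega
  obtain ⟨hK0, hrun, hfail⟩ := pvAxisRun_some h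
  by_cases hK : K = 0
  · omega
  · have hd : d ≠ 0 := fun hd => hK (hd0 hd)
    have h1 := hrun 1 (by omega) (by omega)
    have hKk := hrun K (by omega) (by omega)
    have hm1 : 0 < m := by omega
    have : K ≤ m := by
      rcases lt_or_gt_of_ne hd with hneg | hpos
      · nlinarith [h1.2, hKk.1]
      · nlinarith [h1.1, hKk.2]
    omega

lemma pvInB_iff {imax jmax i j : Int} :
    pvInB imax jmax i j = true ↔ (0 ≤ i ∧ i < imax ∧ 0 ≤ j ∧ j < jmax) := by
  simp [pvInB, and_assoc]

lemma pvInB_false {imax jmax i j : Int} (h : ¬(0 ≤ i ∧ i < imax ∧ 0 ≤ j ∧ j < jmax)) :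
    pvInB imax jmax i j = false := by
  rw [← Bool.not_eq_true, pvInB_iff]; exact h

-- combined step count: in bounds for 1..K, out of bounds at K + 1, and K small enough for the fuel
lemma pvSteps_spec {p_i p_j s_i s_j imax jmax : Int} (hs : ¬(s_i = 0 ∧ s_j = 0)) :
    0 ≤ pvSteps p_i p_j s_i s_j imax jmax ∧
    (∀ k : Int, 1 ≤ k → k ≤ pvSteps p_i p_j s_i s_j imax jmax →
        pvInB imax jmax (p_i + k * s_i) (p_j + k * s_j) = true) ∧
      pvInB imax jmax (p_i + (pvSteps p_i p_j s_i s_j imax jmax + 1) * s_i)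
        (p_j + (pvSteps p_i p_j s_i s_j imax jmax + 1) * s_j) = false ∧
      pvSteps p_i p_j s_i s_j imax jmax ≤ (imax.toNat : Int) + (jmax.toNat : Int) := by
  rcases h1 : pvAxisRun p_i s_i imax with _ | a <;> rcases h2 : pvAxisRun p_j s_j jmax with _ | b
  · obtain ⟨hi0, -⟩ := pvAxisRun_none h1
    obtain ⟨hj0, -⟩ := pvAxisRun_none h2
    exact absurd ⟨hi0, hj0⟩ hs
  · have hKeq : pvSteps p_i p_j s_i s_j imax jmax = b := by unfold pvSteps; rw [h1, h2]
    obtain ⟨hi0, hip1, hip2⟩ := pvAxisRun_none h1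
    obtain ⟨hb0, hrun, hfail⟩ := pvAxisRun_some h2
    subst hi0
    rw [hKeq]
    refine ⟨hb0, fun k hk1 hk2 => pvInB_iff.mpr ⟨by omega, by omega, (hrun k hk1 hk2).1, (hrun k hk1 hk2).2⟩,
      pvInB_false (by intro hh; exact hfail ⟨hh.2.2.1, hh.2.2.2⟩), ?_⟩
    have := pvAxisRun_some_le h2
    omega
  · have hKeq : pvSteps p_i p_j s_i s_j imax jmax = a := by unfold pvSteps; rw [h1, h2]
    obtain ⟨hj0, hjp1, hjp2⟩ := pvAxisRun_none h2
    obtain ⟨ha0, hrun, hfail⟩ := pvAxisRun_some h1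
    subst hj0
    rw [hKeq]
    refine ⟨ha0, fun k hk1 hk2 => pvInB_iff.mpr ⟨(hrun k hk1 hk2).1, (hrun k hk1 hk2).2, by omega, by omega⟩,
      pvInB_false (by intro hh; exact hfail ⟨hh.1, hh.2.1⟩), ?_⟩
    have := pvAxisRun_some_le h1
    omega
  · have hKeq : pvSteps p_i p_j s_i s_j imax jmax = min a b := by unfold pvSteps; rw [h1, h2]
    obtain ⟨ha0, hruna, hfaila⟩ := pvAxisRun_some h1
    obtain ⟨hb0, hrunb, hfailb⟩ := pvAxisRun_some h2
    rw [hKeq]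
    refine ⟨by omega, fun k hk1 hk2 => pvInB_iff.mpr
        ⟨(hruna k hk1 (by omega)).1, (hruna k hk1 (by omega)).2,
         (hrunb k hk1 (by omega)).1, (hrunb k hk1 (by omega)).2⟩, ?_, ?_⟩
    · rcases le_total a b with hab | hab
      · rw [min_eq_left hab]
        exact pvInB_false (by intro hh; exact hfaila ⟨hh.1, hh.2.1⟩)
      · rw [min_eq_right hab]
        exact pvInB_false (by intro hh; exact hfailb ⟨hh.2.2.1, hh.2.2.2⟩)
    · have := pvAxisRun_some_le h1
      omega

-- the while-march equals a fold over range(k0, K + 1) when the run is exactly 1..K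
lemma pvMarch_eq_fold (imax jmax p_i p_j s_i s_j K : Int)
    (hok : ∀ k : Int, 1 ≤ k → k ≤ K → pvInB imax jmax (p_i + k * s_i) (p_j + k * s_j) = true)
    (hfail : pvInB imax jmax (p_i + (K + 1) * s_i) (p_j + (K + 1) * s_j) = false) :
    ∀ (fuel : Nat) (k0 : Int) (s : PySem.Set (Int × Int)), 1 ≤ k0 → k0 ≤ K + 1 →
      (K + 1 - k0).toNat < fuel →
      pvMarch imax jmax p_i p_j s_i s_j k0 fuel s =
        (PySem.List.pyRange k0 (K + 1) 1).foldl
          (fun acc k => PySem.Set.add acc (p_i + k * s_i, p_j + k * s_j)) s := by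
  intro fuel
  induction fuel with
  | zero => intro k0 s h1 h2 h3; omega
  | succ fuel ih =>
    intro k0 s h1 h2 h3
    by_cases hk : k0 = K + 1
    · subst hk
      rw [PySem.List.pyRange_one_eq_nil (le_refl _)]
      simp only [pvMarch, hfail, List.foldl_nil]
      simp
    · have hlt : k0 < K + 1 := by omega
      rw [PySem.List.pyRange_one_cons hlt, List.foldl_cons]
      have hok0 := hok k0 h1 (by omega)
      simp only [pvMarch, hok0, if_true]
      exact ih (k0 + 1) _ (by omega) (by omega) (by omega)

-- A's march in direction s equals B's pvMark, for a non-zero displacement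
lemma pvMarch_eq_pvMark (imax jmax p_i p_j s_i s_j : Int) (hs : ¬(s_i = 0 ∧ s_j = 0))
    (s : PySem.Set (Int × Int)) :
    pvMarch imax jmax p_i p_j s_i s_j 1 (imax.toNat + jmax.toNat + 2) s =
      pvMark imax jmax p_i p_j s_i s_j s := by
  obtain ⟨hK0, hok, hfail, hle⟩ := pvSteps_spec (p_i := p_i) (p_j := p_j) (imax := imax) (jmax := jmax) hs
  exact pvMarch_eq_fold imax jmax p_i p_j s_i s_j _ hok hfail _ 1 s (le_refl 1) (by omega) (by omega)

-- a zero displacement whose base point is out of bounds: the march breaks at once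
lemma pvMarch_zero (imax jmax p_i p_j : Int) (h : pvInB imax jmax p_i p_j = false)
    (s : PySem.Set (Int × Int)) (fuel : Nat) :
    pvMarch imax jmax p_i p_j 0 0 1 (fuel + 1) s = s := by
  simp only [pvMarch]
  norm_num [h]

-- two equal entries at distinct positions make the count at least 2
lemma two_le_count_of_getElem {l : List (Int × Int)} {p q : Nat} (hpq : p < q) (hq : q < l.length)
    (heq : l[p]'(lt_trans hpq hq) = l[q]'hq) : 2 ≤ l.count (l[q]'hq) := by
  have hsplit : l = l.take q ++ l.drop q := (List.take_append_drop q l).symm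
  have h1 : l[q]'hq ∈ l.take q := by
    rw [← heq]
    have hp : p < (l.take q).length := by simp; omega
    have : (l.take q)[p]'hp = l[p]'(lt_trans hpq hq) := by
      simp [List.getElem_take]
    rw [← this]; exact List.getElem_mem hp
  have h2 : l[q]'hq ∈ l.drop q := by
    have h0 : 0 < (l.drop q).length := by simp; omega
    have : (l.drop q)[0]'h0 = l[q]'hq := by simp
    rw [← this]; exact List.getElem_mem h0
  calc 2 ≤ (l.take q).count (l[q]'hq) + (l.drop q).count (l[q]'hq) := by
        have := List.count_pos_iff.mpr h1; have := List.count_pos_iff.mpr h2; omega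
    _ = l.count (l[q]'hq) := by rw [← List.count_append, ← hsplit]

-- the bodies of the p/q loops agree on every accumulator, pair index and frequency
lemma pair_body_eq (imax jmax : Int) (antennas : List (Int × Int))
    (hnodup : ∀ a ∈ antennas, (0 ≤ a.1 ∧ a.1 < imax ∧ 0 ≤ a.2 ∧ a.2 < jmax) → antennas.count a ≤ 1)
    (p q : Int) (hp0 : 0 ≤ p) (hpq : p < q) (hq : q < (antennas.length : Int))
    (acc : PySem.Set (Int × Int)) :
    (let pa := PySem.List.pyGetD antennas p (0, 0)
     let qa := PySem.List.pyGetD antennas q (0, 0)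
     let d_i := pa.1 - qa.1
     let d_j := pa.2 - qa.2
     let fuel := imax.toNat + jmax.toNat + 2
     pvMarch imax jmax pa.1 pa.2 (-d_i) (-d_j) 1 fuel
       (pvMarch imax jmax pa.1 pa.2 d_i d_j 1 fuel acc)) =
    (let pa := PySem.List.pyGetD antennas p (0, 0)
     let qa := PySem.List.pyGetD antennas q (0, 0)
     let d_i := pa.1 - qa.1
     let d_j := pa.2 - qa.2
     if d_i = 0 ∧ d_j = 0 then acc
     else pvMark imax jmax pa.1 pa.2 (-d_i) (-d_j) (pvMark imax jmax pa.1 pa.2 d_i d_j acc)) := by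
  simp only
  have hq0 : 0 ≤ q := by omega
  have hpl : p < (antennas.length : Int) := by omega
  rw [PySem.List.pyGetD_eq_getElem antennas (0, 0) hp0 hpl,
      PySem.List.pyGetD_eq_getElem antennas (0, 0) hq0 hq]
  set pa := antennas[p.toNat]'(by omega) with hpa
  set qa := antennas[q.toNat]'(by omega) with hqa
  by_cases hd : pa.1 - qa.1 = 0 ∧ pa.2 - qa.2 = 0
  · rw [if_pos hd]
    have hpaqa : pa = qa := by
      obtain ⟨h1, h2⟩ := hd
      exact Prod.ext (by omega) (by omega)
    have hcount : 2 ≤ antennas.count qa := by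
      refine two_le_count_of_getElem (p := p.toNat) (q := q.toNat) (by omega) (by omega) ?_
      rw [← hpa, ← hqa]; exact hpaqa
    have hmem : qa ∈ antennas := by rw [hqa]; exact List.getElem_mem _
    have hout : ¬(0 ≤ qa.1 ∧ qa.1 < imax ∧ 0 ≤ qa.2 ∧ qa.2 < jmax) := by
      intro hin
      have := hnodup qa hmem hin
      omega
    have hfalse : pvInB imax jmax pa.1 pa.2 = false := by
      rw [hpaqa]; exact pvInB_false hout
    rw [hd.1, hd.2]
    norm_num
    rw [pvMarch_zero imax jmax pa.1 pa.2 hfalse acc _,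
        pvMarch_zero imax jmax pa.1 pa.2 hfalse acc _]
  · rw [if_neg hd]
    have hd' : ¬(-(pa.1 - qa.1) = 0 ∧ -(pa.2 - qa.2) = 0) := by
      intro hh; exact hd ⟨by omega, by omega⟩
    rw [pvMarch_eq_pvMark imax jmax pa.1 pa.2 _ _ hd' _,
        pvMarch_eq_pvMark imax jmax pa.1 pa.2 _ _ hd _]

-- ===== VERDICT (by name: the statement is the Claim_ definition above) =====
theorem find_antinodes_2_spec : Claim_equal_find_antinodes_2 := by
  intro fa imax jmax hdom hpre
  unfold Spec_find_antinodes_2 find_antinodes_2 find_antinodes_2_alt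
  refine PySem.List.foldl_congr_mem' fa _ _ _ ?_
  intro kv hkv acc
  refine PySem.List.foldl_congr_mem' _ _ _ _ ?_
  intro p hp acc2
  refine PySem.List.foldl_congr_mem' _ _ _ _ ?_
  intro q hq acc3
  obtain ⟨hp1, hp2⟩ := PySem.List.mem_pyRange_one.mp hp
  obtain ⟨hq1, hq2⟩ := PySem.List.mem_pyRange_one.mp hq
  exact pair_body_eq imax jmax kv.2 (hpre kv hkv) p q hp1 (by omega) hq2 acc3
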